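-- pv_equiv track=rewrite | github.com/Nkabisto/TKinterTuts | TimeAttendance.py | staffDatesAndTimesDict
-- ===== SOURCE A (Python) =====
-- def staffDatesAndTimesDict(attendanceData):
--     staffDict = {}
--     for row in attendanceData:
--         date = row[0]
--         time = row[1]
--
--         if date in staffDict.keys():
--             staffDict[date] += ' ' + time
--         else:
--             staffDict[date] = time
--     return staffDict
-- ===== SOURCE B (Python) =====
-- def staffDatesAndTimesDict(attendanceData):
--     groups = {}
--     for date, time in attendanceData:
--         groups.setdefault(date, []).append(time)
--     return {date: ' '.join(times) for date, times in groups.items()}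
-- ===== Notes on version B (the rewrite author's own statement) =====
-- stated objective: idiomatic
-- what changed: B groups times into per-date lists with setdefault in one pass and then joins each list with ' ' in a dict comprehension, instead of growing concatenated strings with an explicit membership test and two assignment branches.
import Mathlib
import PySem

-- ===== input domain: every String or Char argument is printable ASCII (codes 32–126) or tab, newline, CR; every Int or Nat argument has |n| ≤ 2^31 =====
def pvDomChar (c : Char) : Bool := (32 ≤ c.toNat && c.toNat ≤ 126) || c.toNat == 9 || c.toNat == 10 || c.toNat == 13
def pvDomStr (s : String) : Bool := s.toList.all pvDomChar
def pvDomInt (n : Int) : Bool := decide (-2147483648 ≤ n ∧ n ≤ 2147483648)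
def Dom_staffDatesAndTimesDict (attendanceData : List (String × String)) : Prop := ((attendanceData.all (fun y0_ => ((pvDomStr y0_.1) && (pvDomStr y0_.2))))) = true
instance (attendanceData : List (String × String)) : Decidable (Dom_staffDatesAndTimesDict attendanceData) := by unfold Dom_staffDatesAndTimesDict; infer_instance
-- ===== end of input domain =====

-- B groups times into per-date lists in one pass and joins each list with ' ' afterwards,
-- instead of A's running string concatenation behind a membership test (objective: idiomatic).

-- ===== PORT A =====
-- one iteration of A's loop: 'if date in staffDict.keys(): staffDict[date] += " " + time else: staffDict[date] = time'
def pvStepA (d : PySem.Dict String String) (row : String × String) : PySem.Dict String String :=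
  if d.contains row.1 then d.insert row.1 (d.getD row.1 "" ++ " " ++ row.2)
  else d.insert row.1 row.2

def staffDatesAndTimesDict (attendanceData : List (String × String)) : List (String × String) :=
  (attendanceData.foldl pvStepA PySem.Dict.empty).items

-- ===== PORT B =====
-- one iteration of B's loop: 'groups.setdefault(date, []).append(time)'  (= groups[date] = groups.get(date, []) + [time])
def pvStepB (d : PySem.Dict String (List String)) (row : String × String) : PySem.Dict String (List String) :=
  d.modify row.1 [] (· ++ [row.2])

def staffDatesAndTimesDict_alt (attendanceData : List (String × String)) : List (String × String) :=
  (attendanceData.foldl pvStepB PySem.Dict.empty).items.map (fun p => (p.1, PySem.Str.join " " p.2))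

-- ===== PRECONDITION & SPEC =====
def Spec_staffDatesAndTimesDict (attendanceData : List (String × String)) (out : List (String × String)) : Prop := out = staffDatesAndTimesDict_alt attendanceData
instance (attendanceData : List (String × String)) (out : List (String × String)) : Decidable (Spec_staffDatesAndTimesDict attendanceData out) := by unfold Spec_staffDatesAndTimesDict; infer_instance

-- ===== CLAIM (what is proved, stated in full; the proofs are below) =====
def Claim_equal_staffDatesAndTimesDict : Prop := ∀ (attendanceData : List (String × String)), Dom_staffDatesAndTimesDict attendanceData → Spec_staffDatesAndTimesDict attendanceData (staffDatesAndTimesDict attendanceData)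

-- ===== LEMMAS AND PROOFS =====

-- ' '.join over (ps ++ [p]) on the Chars level, for nonempty ps
theorem pvCharsJoin_append_singleton (sep : List Char) (ps : List (List Char)) (p : List Char) (h : ps ≠ []) :
    PySem.Chars.join sep (ps ++ [p]) = PySem.Chars.join sep ps ++ sep ++ p := by
  induction ps with
  | nil => simp at h
  | cons a as ih =>
    cases as with
    | nil => simp [PySem.Chars.join_cons_cons, PySem.Chars.join_singleton]
    | cons b bs =>
      simp only [List.cons_append, PySem.Chars.join_cons_cons] at *
      rw [ih (by simp)]; simp

theorem pvStrJoin_singleton (t : String) : PySem.Str.join " " [t] = t := by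
  apply String.toList_inj.mp
  simp [PySem.Str.join, PySem.Chars.join_singleton]

theorem pvStrJoin_append_singleton (ts : List String) (t : String) (h : ts ≠ []) :
    PySem.Str.join " " (ts ++ [t]) = PySem.Str.join " " ts ++ " " ++ t := by
  apply String.toList_inj.mp
  simp [PySem.Str.join]
  rw [pvCharsJoin_append_singleton _ _ _ (by simpa using h)]
  simp

-- A's step is an insert at the row's date in both branches
theorem pvStepA_eq_insert (d : PySem.Dict String String) (row : String × String) :
    pvStepA d row = d.insert row.1 (if d.contains row.1 then d.getD row.1 "" ++ " " ++ row.2 else row.2) := by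
  unfold pvStepA; split <;> simp_all

-- characterisation of A's dict after the fold: lookup c is the ' '-join of the times filed under c
theorem pvA_get? (l : List (String × String)) (c : String) :
    (l.foldl pvStepA PySem.Dict.empty).get? c =
      if (l.filter (fun p => p.1 == c)) = [] then none
      else some (PySem.Str.join " " ((l.filter (fun p => p.1 == c)).map (·.2))) := by
  induction l using List.reverseRecOn with
  | nil => simp [PySem.Dict.get?_empty]
  | append_singleton l row ih =>
    rw [List.foldl_append, List.foldl_cons, List.foldl_nil, List.filter_append]
    generalize hX : l.foldl pvStepA PySem.Dict.empty = X at ih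
    by_cases hc : row.1 = c
    · subst hc
      have hcont : X.contains row.1 = (X.get? row.1).isSome :=
        PySem.Dict.contains_eq_isSome_get? _ _
      by_cases hF : l.filter (fun p => p.1 == row.1) = []
      · have hnone : X.get? row.1 = none := by rw [ih]; simp [hF]
        unfold pvStepA
        rw [hcont, hnone]
        simp [PySem.Dict.get?_insert_self, hF, pvStrJoin_singleton]
      · have hsome : X.get? row.1 =
            some (PySem.Str.join " " ((l.filter (fun p => p.1 == row.1)).map (·.2))) := by
          rw [ih]; simp [hF]
        unfold pvStepA
        rw [hcont, hsome]
        simp only [Option.isSome_some, if_pos]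
        rw [PySem.Dict.get?_insert_self]
        rw [PySem.Dict.getD_eq_get?_getD, hsome]
        have hne : (l.filter (fun p => p.1 == row.1)).map (·.2) ≠ [] := by
          simpa using hF
        simp [hF, pvStrJoin_append_singleton _ _ hne]
    · rw [pvStepA_eq_insert, PySem.Dict.get?_insert_of_ne _ _ (fun h => hc h.symm)]
      rw [ih]
      have h0 : List.filter (fun p => p.1 == c) [row] = [] := by simp [hc]
      rw [h0, List.append_nil]

-- keys of the two folded dicts coincide (both are the dates in first-occurrence order)
theorem pvKeysA (l : List (String × String)) :
    (l.foldl pvStepA PySem.Dict.empty).keys = PySem.Set.ofList (l.map (·.1)) := by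
  have hf : pvStepA = fun (d : PySem.Dict String String) (row : String × String) =>
      d.insert row.1 (if d.contains row.1 then d.getD row.1 "" ++ " " ++ row.2 else row.2) := by
    funext d row; exact pvStepA_eq_insert d row
  rw [hf, PySem.Dict.keys_foldl_insert_key]
  have := (PySem.Set.ofList_append (α := String) [] (l.map (·.1))).symm
  simp only [List.nil_append] at this
  simpa [PySem.Dict.keys_empty, PySem.Set.ofList_nil] using this

theorem pvKeysB (l : List (String × String)) :
    (l.foldl pvStepB PySem.Dict.empty).keys = PySem.Set.ofList (l.map (·.1)) := by
  unfold pvStepB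
  rw [PySem.Dict.keys_foldl_modify_key]
  have := (PySem.Set.ofList_append (α := String) [] (l.map (·.1))).symm
  simp only [List.nil_append] at this
  simpa [PySem.Dict.keys_empty, PySem.Set.ofList_nil] using this

theorem pvNodupA (l : List (String × String)) : (l.foldl pvStepA PySem.Dict.empty).keys.Nodup := by
  rw [pvKeysA]; exact PySem.Set.nodup_ofList _

theorem pvNodupB (l : List (String × String)) : (l.foldl pvStepB PySem.Dict.empty).keys.Nodup := by
  rw [pvKeysB]; exact PySem.Set.nodup_ofList _

-- ===== VERDICT (by name: the statement is the Claim_ definition above) =====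
theorem staffDatesAndTimesDict_spec : Claim_equal_staffDatesAndTimesDict := by
  intro ad _
  unfold Spec_staffDatesAndTimesDict staffDatesAndTimesDict staffDatesAndTimesDict_alt
  rw [PySem.Dict.items_eq_map_keys _ (pvNodupA ad) ""]
  rw [PySem.Dict.items_eq_map_keys _ (pvNodupB ad) []]
  rw [pvKeysA, pvKeysB, List.map_map]
  apply List.map_congr_left
  intro k hk
  have hmem : k ∈ ad.map (·.1) := (PySem.Set.mem_ofList _ _).mp hk
  have hF : ad.filter (fun p => p.1 == k) ≠ [] := by
    obtain ⟨p, hp, hpk⟩ := List.mem_map.mp hmem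
    intro h
    have : p ∈ ad.filter (fun p => p.1 == k) := List.mem_filter.mpr ⟨hp, by simp [hpk]⟩
    simp [h] at this
  have hB : (ad.foldl pvStepB PySem.Dict.empty).getD k [] =
      (ad.filter (fun p => p.1 == k)).map (·.2) := by
    unfold pvStepB
    rw [PySem.Dict.getD_foldl_modify_append]
    simp [PySem.Dict.getD_empty]
  have hA : (ad.foldl pvStepA PySem.Dict.empty).getD k "" =
      PySem.Str.join " " ((ad.filter (fun p => p.1 == k)).map (·.2)) := by
    rw [PySem.Dict.getD_eq_get?_getD, pvA_get?]
    simp [hF]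
  simp [Function.comp, hA, hB]
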